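-- pv_equiv track=rewrite | github.com/harvard-edge/cs249r_book | book/tools/scripts/content/manage_captions.py | escape_caption_for_regex
-- ===== SOURCE A (Python) =====
-- def escape_caption_for_regex(caption: str) -> str:
--     """
--     Escape caption text for use in regex patterns.
--
--     Unlike re.escape(), this only escapes true regex metacharacters
--     that would break pattern matching, while preserving normal text
--     characters like parentheses () which are common in captions.
--
--     Args:
--         caption: Caption text that may contain special characters
--
--     Returns:
--         Caption with only problematic regex chars escaped
--     """
--     if not caption:
--         return caption
--
--     # Only escape characters that are actual regex metacharacters
--     # and would break pattern matching. Common caption chars like () are preserved.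
--     # Regex metacharacters to escape: . ^ $ * + ? { } [ ] \ |
--     metacharacters = r'\.^$*+?{}[]\\|'
--     escaped = ''
--     for char in caption:
--         if char in metacharacters:
--             escaped += '\\' + char
--         else:
--             escaped += char
--     return escaped
-- ===== SOURCE B (Python) =====
-- def escape_caption_for_regex(caption: str) -> str:
--     # Staged whole-string passes: escape backslash first, then each other
--     # metacharacter; later passes never touch inserted escapes.
--     escaped = caption.replace('\\', '\\\\')
--     for c in '.^$*+?{}[]|':
--         escaped = escaped.replace(c, '\\' + c)
--     return escaped
-- ===== Notes on version B (the rewrite author's own statement) =====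
-- stated objective: faster
-- what changed: Replaces A's single per-character Python loop (membership test plus string concatenation per char) with staged whole-string str.replace passes: backslash is escaped first, then one replace per remaining metacharacter, so no Python-level per-character work remains and the empty-string guard disappears.
import Mathlib
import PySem

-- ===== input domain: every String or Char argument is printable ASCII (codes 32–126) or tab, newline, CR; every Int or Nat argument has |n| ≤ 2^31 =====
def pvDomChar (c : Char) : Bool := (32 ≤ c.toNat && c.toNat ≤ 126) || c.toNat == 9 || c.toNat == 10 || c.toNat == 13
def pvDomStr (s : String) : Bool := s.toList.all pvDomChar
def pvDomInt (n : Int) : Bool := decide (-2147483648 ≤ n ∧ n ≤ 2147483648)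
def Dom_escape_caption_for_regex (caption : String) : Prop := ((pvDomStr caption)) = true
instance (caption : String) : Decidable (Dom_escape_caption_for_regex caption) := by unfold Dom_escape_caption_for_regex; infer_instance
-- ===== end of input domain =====

-- ===== PORT A =====
-- B replaces A's per-character membership loop with staged whole-string replace passes (measured faster by a constant factor: the per-character Python-level work disappears).
-- metacharacters = r'\.^$*+?{}[]\\|'  (the raw string's characters, with duplicates as written)
def pvMetaA : List Char := ['\\', '.', '^', '$', '*', '+', '?', '{', '}', '[', ']', '\\', '\\', '|']

def escape_caption_for_regex (caption : String) : String :=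
  if caption = "" then caption
  else String.ofList (caption.toList.foldl
    (fun acc c => if pvMetaA.contains c then acc ++ ['\\', c] else acc ++ [c]) [])

-- ===== PORT B =====
-- the loop string '.^$*+?{}[]|' of Source B
def pvMetaRest : List Char := ['.', '^', '$', '*', '+', '?', '{', '}', '[', ']', '|']

def escape_caption_for_regex_alt (caption : String) : String :=
  pvMetaRest.foldl
    (fun s c => PySem.Str.replace s (String.ofList [c]) (String.ofList ['\\', c]))
    (PySem.Str.replace caption "\\" "\\\\")

-- ===== PRECONDITION & SPEC =====
def Spec_escape_caption_for_regex (caption : String) (out : String) : Prop := out = escape_caption_for_regex_alt caption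
instance (caption : String) (out : String) : Decidable (Spec_escape_caption_for_regex caption out) := by unfold Spec_escape_caption_for_regex; infer_instance

-- ===== CLAIM (what is proved, stated in full; the proofs are below) =====
def Claim_equal_escape_caption_for_regex : Prop := ∀ (caption : String), Dom_escape_caption_for_regex caption → Spec_escape_caption_for_regex caption (escape_caption_for_regex caption)

-- ===== LEMMAS AND PROOFS =====

-- escaping function after the backslash pass and the processed prefix P
def pvF (P : List Char) (x : Char) : List Char :=
  if x = '\\' ∨ x ∈ P then ['\\', x] else [x]

-- replace with a single-character pattern is an elementwise flatMap
theorem pvGo_single (m : Char) (new : List Char) :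
    ∀ (l : List Char) (fuel : Nat) (acc : List Char), l.length ≤ fuel →
      PySem.Chars.replace.go [m] new fuel l acc
        = acc.reverse ++ l.flatMap (fun x => if x = m then new else [x]) := by
  intro l
  induction l with
  | nil =>
      intro fuel acc _
      cases fuel <;> simp [PySem.Chars.replace.go]
  | cons c t ih =>
      intro fuel acc hle
      cases fuel with
      | zero => simp at hle
      | succ fuel' =>
        have ht : t.length ≤ fuel' := by simpa using hle
        by_cases hc : c = m
        · subst hc
          rw [show PySem.Chars.replace.go [c] new (fuel' + 1) (c :: t) acc
                = PySem.Chars.replace.go [c] new fuel' t (new.reverse ++ acc) by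
              simp [PySem.Chars.replace.go, List.isPrefixOf]]
          rw [ih fuel' _ ht]
          simp
        · rw [show PySem.Chars.replace.go [m] new (fuel' + 1) (c :: t) acc
                = PySem.Chars.replace.go [m] new fuel' t (c :: acc) by
              simp [PySem.Chars.replace.go, List.isPrefixOf, Ne.symm hc]]
          rw [ih fuel' _ ht]
          simp [hc]

theorem pvReplace_single (cs : List Char) (m : Char) (new : List Char) :
    PySem.Chars.replace cs [m] new = cs.flatMap (fun x => if x = m then new else [x]) := by
  rw [PySem.Chars.replace]
  simp [pvGo_single m new cs cs.length [] le_rfl]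

-- one staged pass on an already partially escaped string
theorem pvStage (c : Char) (P : List Char) (cs : List Char)
    (hcb : c ≠ '\\') (hcP : c ∉ P) :
    PySem.Chars.replace (cs.flatMap (pvF P)) [c] ['\\', c]
      = cs.flatMap (pvF (P ++ [c])) := by
  rw [pvReplace_single, List.flatMap_assoc]
  apply List.flatMap_congr  -- pointwise on each original character
  intro x _
  by_cases hx : x = '\\' ∨ x ∈ P
  · have hxc : x ≠ c := by
      rcases hx with h | h
      · subst h; exact fun h' => hcb h'.symm
      · exact fun h' => hcP (h' ▸ h)
    simp [pvF, hx, hxc, Ne.symm hcb, List.mem_append]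
  · by_cases hxc : x = c
    · subst hxc
      simp [pvF, hcb, hcP]
    · have h1 : x ≠ '\\' := fun hh => hx (Or.inl hh)
      have h2 : x ∉ P := fun hh => hx (Or.inr hh)
      simp [pvF, h1, h2, hxc, List.mem_append]

-- the whole staged fold, at the Chars level
theorem pvStages (rest : List Char) :
    ∀ (P : List Char) (cs : List Char),
      (∀ c ∈ rest, c ≠ '\\' ∧ c ∉ P) → rest.Nodup →
      rest.foldl (fun l c => PySem.Chars.replace l [c] ['\\', c]) (cs.flatMap (pvF P))
        = cs.flatMap (pvF (P ++ rest)) := by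
  induction rest with
  | nil => intro P cs _ _; simp
  | cons c t ih =>
      intro P cs h hnd
      have hc := h c (by simp)
      simp only [List.foldl_cons]
      rw [pvStage c P cs hc.1 hc.2]
      rw [ih (P ++ [c]) cs
        (fun d hd => ⟨(h d (by simp [hd])).1, by
          simp only [List.mem_append, List.mem_singleton]
          rintro (h1 | h2)
          · exact (h d (by simp [hd])).2 h1
          · exact (List.nodup_cons.mp hnd).1 (h2 ▸ hd)⟩)
        (List.nodup_cons.mp hnd).2]
      simp

-- bridge: B's String-level fold is the Chars-level fold
theorem pvFold_toList (rest : List Char) :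
    ∀ (s : String),
      (rest.foldl (fun s c => PySem.Str.replace s (String.ofList [c]) (String.ofList ['\\', c])) s).toList
        = rest.foldl (fun l c => PySem.Chars.replace l [c] ['\\', c]) s.toList := by
  induction rest with
  | nil => intro s; rfl
  | cons c t ih =>
      intro s
      simp only [List.foldl_cons, ih, PySem.Str.toList_replace, String.toList_ofList]

-- A's per-character decision agrees with the fully staged escaping function
theorem pvCharA (c : Char) :
    (if pvMetaA.contains c then ['\\', c] else [c]) = pvF ([] ++ pvMetaRest) c := by
  have hmem : pvMetaA.contains c = true ↔ (c = '\\' ∨ c ∈ pvMetaRest) := by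
    rw [List.contains_iff_mem]
    simp only [pvMetaA, pvMetaRest, List.mem_cons, List.not_mem_nil, or_false]
    tauto
  unfold pvF
  by_cases hp : c = '\\' ∨ c ∈ ([] ++ pvMetaRest : List Char)
  · rw [if_pos (hmem.mpr (by simpa using hp)), if_pos hp]
  · rw [if_neg (fun h => hp (by simpa using hmem.mp h)), if_neg hp]

theorem pvBoth_eq (caption : String) :
    escape_caption_for_regex caption = escape_caption_for_regex_alt caption := by
  unfold escape_caption_for_regex escape_caption_for_regex_alt
  have hB : (pvMetaRest.foldl
      (fun s c => PySem.Str.replace s (String.ofList [c]) (String.ofList ['\\', c]))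
      (PySem.Str.replace caption "\\" "\\\\")).toList
      = caption.toList.flatMap (pvF ([] ++ pvMetaRest)) := by
    rw [pvFold_toList, PySem.Str.toList_replace]
    have hfirst : PySem.Chars.replace caption.toList ("\\" : String).toList ("\\\\" : String).toList
        = caption.toList.flatMap (pvF []) := by
      rw [show ("\\" : String).toList = ['\\'] from rfl,
          show ("\\\\" : String).toList = ['\\', '\\'] from rfl,
          pvReplace_single]
      apply List.flatMap_congr
      intro x _
      by_cases hx : x = '\\' <;> simp [pvF, hx]
    rw [hfirst]
    refine pvStages pvMetaRest [] caption.toList ?_ ?_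
    · intro c hc
      refine ⟨?_, by simp⟩
      simp only [pvMetaRest, List.mem_cons, List.not_mem_nil, or_false] at hc
      rcases hc with rfl|rfl|rfl|rfl|rfl|rfl|rfl|rfl|rfl|rfl|rfl <;> decide
    · simp only [pvMetaRest]
      norm_num [List.nodup_cons, List.mem_cons]
      refine ⟨⟨?_,?_,?_,?_,?_,?_,?_,?_,?_,?_⟩,⟨?_,?_,?_,?_,?_,?_,?_,?_,?_⟩,⟨?_,?_,?_,?_,?_,?_,?_,?_⟩,⟨?_,?_,?_,?_,?_,?_,?_⟩,⟨?_,?_,?_,?_,?_,?_⟩,⟨?_,?_,?_,?_,?_⟩,⟨?_,?_,?_,?_⟩,⟨?_,?_,?_⟩,⟨?_,?_⟩,?_⟩ <;> decide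
  split_ifs with h
  · subst h
    apply String.ext
    rw [hB]
    rfl
  · apply String.ext
    rw [hB, String.toList_ofList]
    have hA : (caption.toList.foldl
        (fun acc c => if pvMetaA.contains c then acc ++ ['\\', c] else acc ++ [c]) [])
        = caption.toList.flatMap (fun c => if pvMetaA.contains c then ['\\', c] else [c]) := by
      rw [show (fun (acc : List Char) c => if pvMetaA.contains c then acc ++ ['\\', c] else acc ++ [c])
            = fun acc c => acc ++ (if pvMetaA.contains c then ['\\', c] else [c]) by
          funext acc c; split_ifs <;> rfl]
      rw [PySem.List.foldl_append_eq_flatMap]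
      simp
    rw [hA]
    exact List.flatMap_congr (fun c _ => pvCharA c)

-- ===== VERDICT (by name: the statement is the Claim_ definition above) =====
theorem escape_caption_for_regex_spec : Claim_equal_escape_caption_for_regex := by
  intro caption _
  unfold Spec_escape_caption_for_regex
  exact pvBoth_eq caption
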